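-- pv_equiv track=rewrite | github.com/Stokn9x/ProStatica | src/Server/API/Analysis.py | map_sorter
-- ===== SOURCE A (Python) =====
-- def map_sorter(maps_played):
--     maps = {
--         "Mirage": 0,
--         "Vertigo": 0,
--         "Ancient": 0,
--         "Overpass": 0,
--         "Nuke": 0,
--         "Inferno": 0,
--         "Anubis": 0
--     }
--
--     for map in maps_played:
--         if map == 0:
--             maps["Mirage"] += 1
--         elif map == 1:
--             maps["Vertigo"] += 1
--         elif map == 2:
--             maps["Ancient"] += 1
--         elif map == 3:
--             maps["Overpass"] += 1
--         elif map == 4: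
--             maps["Nuke"] += 1
--         elif map == 5:
--             maps["Inferno"] += 1
--         elif map == 6:
--             maps["Anubis"] += 1
--
--     return maps
-- ===== SOURCE B (Python) =====
-- def map_sorter(maps_played):
--     names = ["Mirage", "Vertigo", "Ancient", "Overpass", "Nuke", "Inferno", "Anubis"]
--     return {name: maps_played.count(i) for i, name in enumerate(names)}
-- ===== Notes on version B (the rewrite author's own statement) =====
-- stated objective: simpler
-- what changed: Replaces the per-element if/elif chain mutating a pre-built dict with a count-then-project two-phase structure: the result dict is built in one comprehension from the fixed index->name list using maps_played.count(i).
import Mathlib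
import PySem

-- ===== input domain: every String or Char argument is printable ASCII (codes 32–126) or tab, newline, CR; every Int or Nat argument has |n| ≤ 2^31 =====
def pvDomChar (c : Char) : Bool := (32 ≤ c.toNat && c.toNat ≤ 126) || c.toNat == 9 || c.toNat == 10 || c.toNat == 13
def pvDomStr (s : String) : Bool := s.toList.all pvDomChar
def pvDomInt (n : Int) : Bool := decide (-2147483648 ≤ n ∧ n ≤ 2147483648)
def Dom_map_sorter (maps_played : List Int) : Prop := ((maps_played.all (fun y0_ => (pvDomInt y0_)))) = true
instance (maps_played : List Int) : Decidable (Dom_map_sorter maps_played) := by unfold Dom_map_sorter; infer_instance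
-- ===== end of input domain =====

-- B builds the result in one comprehension from the fixed name list via list.count (count-then-project), instead of A's per-element if/elif dict mutation; objective: simpler.


-- ===== PORT A =====
def map_sorter (maps_played : List Int) : List (String × Int) :=
  let maps : PySem.Dict String Int := PySem.Dict.ofList
    [("Mirage", 0), ("Vertigo", 0), ("Ancient", 0), ("Overpass", 0),
     ("Nuke", 0), ("Inferno", 0), ("Anubis", 0)]
  (maps_played.foldl (fun d m =>
      if m == 0 then d.insert "Mirage" (d.getD "Mirage" 0 + 1)
      else if m == 1 then d.insert "Vertigo" (d.getD "Vertigo" 0 + 1)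
      else if m == 2 then d.insert "Ancient" (d.getD "Ancient" 0 + 1)
      else if m == 3 then d.insert "Overpass" (d.getD "Overpass" 0 + 1)
      else if m == 4 then d.insert "Nuke" (d.getD "Nuke" 0 + 1)
      else if m == 5 then d.insert "Inferno" (d.getD "Inferno" 0 + 1)
      else if m == 6 then d.insert "Anubis" (d.getD "Anubis" 0 + 1)
      else d) maps).items

-- ===== PORT B =====
def map_sorter_alt (maps_played : List Int) : List (String × Int) :=
  (PySem.List.enumerate ["Mirage", "Vertigo", "Ancient", "Overpass", "Nuke", "Inferno", "Anubis"]).map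
    (fun p => (p.2, (PySem.List.count maps_played p.1 : Int)))

-- ===== PRECONDITION & SPEC =====
def Spec_map_sorter (maps_played : List Int) (out : List (String × Int)) : Prop := out = map_sorter_alt maps_played
instance (maps_played : List Int) (out : List (String × Int)) : Decidable (Spec_map_sorter maps_played out) := by unfold Spec_map_sorter; infer_instance

-- ===== CLAIM (what is proved, stated in full; the proofs are below) =====
def Claim_equal_map_sorter : Prop := ∀ (maps_played : List Int), Dom_map_sorter maps_played → Spec_map_sorter maps_played (map_sorter maps_played)

-- ===== LEMMAS AND PROOFS =====

-- One increment step of A's loop on the 7-key state, per matched key.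
theorem bump0 (a b c d e f g : Int) :
    ((PySem.Dict.mk [("Mirage", a), ("Vertigo", b), ("Ancient", c), ("Overpass", d), ("Nuke", e), ("Inferno", f), ("Anubis", g)]).insert "Mirage"
      ((PySem.Dict.mk [("Mirage", a), ("Vertigo", b), ("Ancient", c), ("Overpass", d), ("Nuke", e), ("Inferno", f), ("Anubis", g)]).getD "Mirage" 0 + 1)) =
    PySem.Dict.mk [("Mirage", a + 1), ("Vertigo", b), ("Ancient", c), ("Overpass", d), ("Nuke", e), ("Inferno", f), ("Anubis", g)] := by
  apply PySem.Dict.ext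
  simp [PySem.Dict.items_insert, PySem.Dict.getD_eq_get?_getD, PySem.Dict.get?_mk_cons]

theorem bump1 (a b c d e f g : Int) :
    ((PySem.Dict.mk [("Mirage", a), ("Vertigo", b), ("Ancient", c), ("Overpass", d), ("Nuke", e), ("Inferno", f), ("Anubis", g)]).insert "Vertigo"
      ((PySem.Dict.mk [("Mirage", a), ("Vertigo", b), ("Ancient", c), ("Overpass", d), ("Nuke", e), ("Inferno", f), ("Anubis", g)]).getD "Vertigo" 0 + 1)) =
    PySem.Dict.mk [("Mirage", a), ("Vertigo", b + 1), ("Ancient", c), ("Overpass", d), ("Nuke", e), ("Inferno", f), ("Anubis", g)] := by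
  apply PySem.Dict.ext
  simp [PySem.Dict.items_insert, PySem.Dict.getD_eq_get?_getD, PySem.Dict.get?_mk_cons]

theorem bump2 (a b c d e f g : Int) :
    ((PySem.Dict.mk [("Mirage", a), ("Vertigo", b), ("Ancient", c), ("Overpass", d), ("Nuke", e), ("Inferno", f), ("Anubis", g)]).insert "Ancient"
      ((PySem.Dict.mk [("Mirage", a), ("Vertigo", b), ("Ancient", c), ("Overpass", d), ("Nuke", e), ("Inferno", f), ("Anubis", g)]).getD "Ancient" 0 + 1)) =
    PySem.Dict.mk [("Mirage", a), ("Vertigo", b), ("Ancient", c + 1), ("Overpass", d), ("Nuke", e), ("Inferno", f), ("Anubis", g)] := by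
  apply PySem.Dict.ext
  simp [PySem.Dict.items_insert, PySem.Dict.getD_eq_get?_getD, PySem.Dict.get?_mk_cons]

theorem bump3 (a b c d e f g : Int) :
    ((PySem.Dict.mk [("Mirage", a), ("Vertigo", b), ("Ancient", c), ("Overpass", d), ("Nuke", e), ("Inferno", f), ("Anubis", g)]).insert "Overpass"
      ((PySem.Dict.mk [("Mirage", a), ("Vertigo", b), ("Ancient", c), ("Overpass", d), ("Nuke", e), ("Inferno", f), ("Anubis", g)]).getD "Overpass" 0 + 1)) =
    PySem.Dict.mk [("Mirage", a), ("Vertigo", b), ("Ancient", c), ("Overpass", d + 1), ("Nuke", e), ("Inferno", f), ("Anubis", g)] := by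
  apply PySem.Dict.ext
  simp [PySem.Dict.items_insert, PySem.Dict.getD_eq_get?_getD, PySem.Dict.get?_mk_cons]

theorem bump4 (a b c d e f g : Int) :
    ((PySem.Dict.mk [("Mirage", a), ("Vertigo", b), ("Ancient", c), ("Overpass", d), ("Nuke", e), ("Inferno", f), ("Anubis", g)]).insert "Nuke"
      ((PySem.Dict.mk [("Mirage", a), ("Vertigo", b), ("Ancient", c), ("Overpass", d), ("Nuke", e), ("Inferno", f), ("Anubis", g)]).getD "Nuke" 0 + 1)) =
    PySem.Dict.mk [("Mirage", a), ("Vertigo", b), ("Ancient", c), ("Overpass", d), ("Nuke", e + 1), ("Inferno", f), ("Anubis", g)] := by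
  apply PySem.Dict.ext
  simp [PySem.Dict.items_insert, PySem.Dict.getD_eq_get?_getD, PySem.Dict.get?_mk_cons]

theorem bump5 (a b c d e f g : Int) :
    ((PySem.Dict.mk [("Mirage", a), ("Vertigo", b), ("Ancient", c), ("Overpass", d), ("Nuke", e), ("Inferno", f), ("Anubis", g)]).insert "Inferno"
      ((PySem.Dict.mk [("Mirage", a), ("Vertigo", b), ("Ancient", c), ("Overpass", d), ("Nuke", e), ("Inferno", f), ("Anubis", g)]).getD "Inferno" 0 + 1)) =
    PySem.Dict.mk [("Mirage", a), ("Vertigo", b), ("Ancient", c), ("Overpass", d), ("Nuke", e), ("Inferno", f + 1), ("Anubis", g)] := by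
  apply PySem.Dict.ext
  simp [PySem.Dict.items_insert, PySem.Dict.getD_eq_get?_getD, PySem.Dict.get?_mk_cons]

theorem bump6 (a b c d e f g : Int) :
    ((PySem.Dict.mk [("Mirage", a), ("Vertigo", b), ("Ancient", c), ("Overpass", d), ("Nuke", e), ("Inferno", f), ("Anubis", g)]).insert "Anubis"
      ((PySem.Dict.mk [("Mirage", a), ("Vertigo", b), ("Ancient", c), ("Overpass", d), ("Nuke", e), ("Inferno", f), ("Anubis", g)]).getD "Anubis" 0 + 1)) =
    PySem.Dict.mk [("Mirage", a), ("Vertigo", b), ("Ancient", c), ("Overpass", d), ("Nuke", e), ("Inferno", f), ("Anubis", g + 1)] := by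
  apply PySem.Dict.ext
  simp [PySem.Dict.items_insert, PySem.Dict.getD_eq_get?_getD, PySem.Dict.get?_mk_cons]

-- Loop invariant: A's fold over l from the 7-key state adds l.count i to each count.
theorem map_sorter_loop (l : List Int) (a b c d e f g : Int) :
    (l.foldl (fun d m =>
      if m == 0 then d.insert "Mirage" (d.getD "Mirage" 0 + 1)
      else if m == 1 then d.insert "Vertigo" (d.getD "Vertigo" 0 + 1)
      else if m == 2 then d.insert "Ancient" (d.getD "Ancient" 0 + 1)
      else if m == 3 then d.insert "Overpass" (d.getD "Overpass" 0 + 1)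
      else if m == 4 then d.insert "Nuke" (d.getD "Nuke" 0 + 1)
      else if m == 5 then d.insert "Inferno" (d.getD "Inferno" 0 + 1)
      else if m == 6 then d.insert "Anubis" (d.getD "Anubis" 0 + 1)
      else d)
      (PySem.Dict.mk [("Mirage", a), ("Vertigo", b), ("Ancient", c), ("Overpass", d),
        ("Nuke", e), ("Inferno", f), ("Anubis", g)])).items =
    [("Mirage", a + (l.count 0 : Int)), ("Vertigo", b + (l.count 1 : Int)),
     ("Ancient", c + (l.count 2 : Int)), ("Overpass", d + (l.count 3 : Int)),
     ("Nuke", e + (l.count 4 : Int)), ("Inferno", f + (l.count 5 : Int)),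
     ("Anubis", g + (l.count 6 : Int))] := by
  induction l generalizing a b c d e f g with
  | nil => simp
  | cons m t ih =>
    simp only [List.foldl_cons, List.count_cons]
    by_cases h0 : m = 0
    · subst h0
      conv_lhs => rw [if_pos (by decide : ((0:Int) == 0) = true), bump0, ih]
      norm_num; omega
    by_cases h1 : m = 1
    · subst h1
      conv_lhs => rw [if_neg (by decide : ¬((1:Int) == 0) = true), if_pos (by decide : ((1:Int) == 1) = true), bump1, ih]
      norm_num; omega
    by_cases h2 : m = 2
    · subst h2
      conv_lhs => rw [if_neg (by decide : ¬((2:Int) == 0) = true), if_neg (by decide : ¬((2:Int) == 1) = true), if_pos (by decide : ((2:Int) == 2) = true), bump2, ih]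
      norm_num; omega
    by_cases h3 : m = 3
    · subst h3
      conv_lhs => rw [if_neg (by decide : ¬((3:Int) == 0) = true), if_neg (by decide : ¬((3:Int) == 1) = true), if_neg (by decide : ¬((3:Int) == 2) = true), if_pos (by decide : ((3:Int) == 3) = true), bump3, ih]
      norm_num; omega
    by_cases h4 : m = 4
    · subst h4
      conv_lhs => rw [if_neg (by decide : ¬((4:Int) == 0) = true), if_neg (by decide : ¬((4:Int) == 1) = true), if_neg (by decide : ¬((4:Int) == 2) = true), if_neg (by decide : ¬((4:Int) == 3) = true), if_pos (by decide : ((4:Int) == 4) = true), bump4, ih]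
      norm_num; omega
    by_cases h5 : m = 5
    · subst h5
      conv_lhs => rw [if_neg (by decide : ¬((5:Int) == 0) = true), if_neg (by decide : ¬((5:Int) == 1) = true), if_neg (by decide : ¬((5:Int) == 2) = true), if_neg (by decide : ¬((5:Int) == 3) = true), if_neg (by decide : ¬((5:Int) == 4) = true), if_pos (by decide : ((5:Int) == 5) = true), bump5, ih]
      norm_num; omega
    by_cases h6 : m = 6
    · subst h6
      conv_lhs => rw [if_neg (by decide : ¬((6:Int) == 0) = true), if_neg (by decide : ¬((6:Int) == 1) = true), if_neg (by decide : ¬((6:Int) == 2) = true), if_neg (by decide : ¬((6:Int) == 3) = true), if_neg (by decide : ¬((6:Int) == 4) = true), if_neg (by decide : ¬((6:Int) == 5) = true), if_pos (by decide : ((6:Int) == 6) = true), bump6, ih]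
      norm_num; omega
    · conv_lhs => rw [if_neg (by simp [h0] : ¬(m == 0) = true), if_neg (by simp [h1] : ¬(m == 1) = true),
        if_neg (by simp [h2] : ¬(m == 2) = true), if_neg (by simp [h3] : ¬(m == 3) = true),
        if_neg (by simp [h4] : ¬(m == 4) = true), if_neg (by simp [h5] : ¬(m == 5) = true),
        if_neg (by simp [h6] : ¬(m == 6) = true), ih]
      simp [h0, h1, h2, h3, h4, h5, h6]

-- ===== VERDICT (by name: the statement is the Claim_ definition above) =====
theorem map_sorter_spec : Claim_equal_map_sorter := by
  intro l _
  unfold Spec_map_sorter map_sorter map_sorter_alt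
  have hinit : (PySem.Dict.ofList
      [("Mirage", (0:Int)), ("Vertigo", 0), ("Ancient", 0), ("Overpass", 0),
       ("Nuke", 0), ("Inferno", 0), ("Anubis", 0)] : PySem.Dict String Int) =
      PySem.Dict.mk [("Mirage", 0), ("Vertigo", 0), ("Ancient", 0), ("Overpass", 0),
       ("Nuke", 0), ("Inferno", 0), ("Anubis", 0)] := by decide
  simp only [hinit, map_sorter_loop]
  simp [PySem.List.enumerate_cons, PySem.List.enumerate_nil, PySem.List.count_eq]
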